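-- pv_equiv track=rewrite | github.com/murilo-1234/winegod-app | backend/routes/config.py | _normalize_enabled_locales
-- ===== SOURCE A (Python) =====
-- ALLOWED_LOCALES = ("pt-BR", "en-US", "es-419", "fr-FR")
--
-- def _normalize_enabled_locales(value):
--     """Valida uma lista de locales contra a whitelist Tier 1.
--
--     Retorna nova lista (mesma ordem, sem duplicatas) se todos os itens
--     forem strings validas e a lista for nao-vazia. Retorna None caso
--     contrario.
--     """
--     if not isinstance(value, list) or not value:
--         return None
--     cleaned = []
--     seen = set()
--     for item in value:
--         if not isinstance(item, str) or item not in ALLOWED_LOCALES: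
--             return None
--         if item in seen:
--             continue
--         seen.add(item)
--         cleaned.append(item)
--     return cleaned if cleaned else None
-- ===== SOURCE B (Python) =====
-- ALLOWED_LOCALES = ("pt-BR", "en-US", "es-419", "fr-FR")
--
-- def _normalize_enabled_locales(value):
--     """Reject invalid input; otherwise order the distinct locales by first appearance."""
--     if not isinstance(value, list) or not value:
--         return None
--     if any(not isinstance(x, str) or x not in ALLOWED_LOCALES for x in value):
--         return None
--     return sorted(set(value), key=value.index)
-- ===== Notes on version B (the rewrite author's own statement) =====
-- stated objective: alternative
-- what changed: A's single interleaved loop (seen-set membership, append, early return) is replaced by a whole-list validation pass followed by building set(value) and stable-sorting its distinct elements by their first index in the input (sorted(set(value), key=value.index)).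
import Mathlib
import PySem

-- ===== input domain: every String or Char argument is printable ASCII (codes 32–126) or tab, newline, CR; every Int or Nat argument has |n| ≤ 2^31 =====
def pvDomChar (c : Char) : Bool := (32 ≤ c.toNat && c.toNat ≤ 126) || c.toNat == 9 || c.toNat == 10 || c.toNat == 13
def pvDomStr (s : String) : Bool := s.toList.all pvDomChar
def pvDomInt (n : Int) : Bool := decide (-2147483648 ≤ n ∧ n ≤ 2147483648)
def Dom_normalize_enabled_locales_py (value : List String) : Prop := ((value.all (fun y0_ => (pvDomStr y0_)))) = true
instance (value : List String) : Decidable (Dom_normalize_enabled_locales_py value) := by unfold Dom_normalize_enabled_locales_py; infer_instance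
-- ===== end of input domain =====

-- B replaces A's interleaved validate/dedup loop by a validation pass, then sorted(set(value), key=value.index) (alternative decomposition, same behaviour).

def ALLOWED_LOCALES : List String := ["pt-BR", "en-US", "es-419", "fr-FR"]

-- ===== PORT A =====
-- A's loop: early return None on invalid item, skip seen items, append fresh ones.
def aLoop (items : List String) (cleaned : List String) (seen : PySem.Set String) : Option (List String) :=
  match items with
  | [] => if cleaned = [] then none else some cleaned
  | item :: rest =>
    if ¬ (item ∈ ALLOWED_LOCALES) then none
    else if PySem.Set.contains seen item then aLoop rest cleaned seen
    else aLoop rest (cleaned ++ [item]) (PySem.Set.add seen item)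

def normalize_enabled_locales_py (value : List String) : Option (List String) :=
  if value = [] then none
  else aLoop value [] PySem.Set.empty

-- ===== PORT B =====
-- Source B: empty guard; any() invalidity pass; sorted(set(value), key=value.index)
-- (key = first index in value, injective on the set, so the set's hash order cannot matter).
def normalize_enabled_locales_py_alt (value : List String) : Option (List String) :=
  if value = [] then none
  else if value.any (fun x => decide (¬ (x ∈ ALLOWED_LOCALES))) then none
  else some (PySem.List.sorted (PySem.Set.ofList value)
      (fun x => (PySem.List.index? value x).getD 0) false)

-- ===== PRECONDITION & SPEC =====
def Spec_normalize_enabled_locales_py (value : List String) (out : Option (List String)) : Prop := out = normalize_enabled_locales_py_alt value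
instance (value : List String) (out : Option (List String)) : Decidable (Spec_normalize_enabled_locales_py value out) := by unfold Spec_normalize_enabled_locales_py; infer_instance

-- ===== CLAIM (what is proved, stated in full; the proofs are below) =====
def Claim_equal_normalize_enabled_locales_py : Prop := ∀ (value : List String), Dom_normalize_enabled_locales_py value → Spec_normalize_enabled_locales_py value (normalize_enabled_locales_py value)

-- ===== LEMMAS AND PROOFS =====

-- dedup-fold step used to characterise A's accumulator
def dstep (acc : List String) (x : String) : List String :=
  if x ∈ acc then acc else acc ++ [x]

lemma dstep_ne_nil (acc : List String) (x : String) (h : acc ≠ []) : dstep acc x ≠ [] := by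
  unfold dstep; split <;> simp_all

lemma foldl_dstep_ne_nil (xs : List String) (acc : List String) (h : acc ≠ []) :
    xs.foldl dstep acc ≠ [] := by
  induction xs generalizing acc with
  | nil => simpa
  | cons x xs ih => exact ih _ (dstep_ne_nil acc x h)

lemma dedup_eq_foldl (xs : List String) : PySem.List.dedup xs = xs.foldl dstep [] := by
  have : ∀ xs acc, List.foldl PySem.Set.add acc xs = List.foldl dstep acc xs := by
    intro xs
    induction xs with
    | nil => intro acc; rfl
    | cons x t ih =>
      intro acc
      simp only [List.foldl_cons, ih]
      congr 1
      simp [PySem.Set.add, dstep, PySem.Set.contains]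
  simp [PySem.List.dedup_eq_ofList, PySem.Set.ofList_eq_foldl, this]

lemma aLoop_char (xs : List String) : ∀ (cleaned : List String) (seen : PySem.Set String),
    (∀ x, PySem.Set.contains seen x = decide (x ∈ cleaned)) →
    aLoop xs cleaned seen =
      if xs.all (fun x => decide (x ∈ ALLOWED_LOCALES)) then
        (if xs.foldl dstep cleaned = [] then none else some (xs.foldl dstep cleaned))
      else none := by
  induction xs with
  | nil => intro cleaned seen _; simp [aLoop]
  | cons x rest ih =>
    intro cleaned seen hinv
    by_cases hx : x ∈ ALLOWED_LOCALES
    · by_cases hmem : x ∈ cleaned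
      · have hc : PySem.Set.contains seen x = true := by rw [hinv]; simpa
        have hstep : dstep cleaned x = cleaned := by simp [dstep, hmem]
        simp only [aLoop, not_true, if_false, hc, if_true, List.all_cons,
          List.foldl_cons, hstep, hx, decide_true, Bool.true_and]
        exact ih cleaned seen hinv
      · have hc : PySem.Set.contains seen x = false := by rw [hinv]; simpa
        have hstep : dstep cleaned x = cleaned ++ [x] := by simp [dstep, hmem]
        simp only [aLoop, not_true, if_false, hc, Bool.false_eq_true, if_false,
          List.all_cons, List.foldl_cons, hstep, hx, decide_true, Bool.true_and]
        exact ih (cleaned ++ [x]) (PySem.Set.add seen x) (by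
          intro y
          by_cases hy : y = x
          · subst hy
            simp only [PySem.Set.add, PySem.Set.contains]
            split <;> simp_all
          · simp [PySem.Set.add, PySem.Set.contains, hy]
            split <;> simp [PySem.Set.contains] at * <;> simp_all)
    · simp [aLoop, hx]

-- the B-side key: first index in `full`
def bkey (full : List String) (x : String) : Nat :=
  (PySem.List.index? full x).getD 0

lemma bkey_lt_of_mem_append (pre suf : List String) (a : String) (ha : a ∈ pre) :
    bkey (pre ++ suf) a < pre.length := by
  obtain ⟨k, hk⟩ := Option.isSome_iff_exists.1 ((PySem.List.index?_isSome_iff pre a).2 ha)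
  obtain ⟨hlt, -⟩ := PySem.List.getElem_of_index?_eq_some hk
  unfold bkey
  rw [PySem.List.index?_append_of_mem suf ha, hk]
  simpa using hlt

lemma bkey_head_append (pre suf : List String) (x : String) (hx : x ∉ pre) :
    bkey (pre ++ x :: suf) x = pre.length := by
  have h : PySem.List.index? (pre ++ x :: suf) x = some pre.length :=
    (PySem.List.index?_eq_some_iff (pre ++ x :: suf) x pre.length).2 ⟨pre, suf, rfl, rfl, hx⟩
  unfold bkey
  rw [h]
  rfl

-- first-occurrence order: Set.ofList (built by foldl add) is strictly increasing under bkey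
lemma ofList_pairwise_bkey (full : List String) :
    ∀ (xs pre : List String) (acc : PySem.Set String), full = pre ++ xs →
    (∀ a, a ∈ acc ↔ a ∈ pre) →
    acc.Pairwise (fun a b => bkey full a < bkey full b) →
    (xs.foldl PySem.Set.add acc).Pairwise (fun a b => bkey full a < bkey full b) := by
  intro xs
  induction xs with
  | nil => intro pre acc _ _ hp; simpa
  | cons x rest ih =>
    intro pre acc hfull hmem hp
    simp only [List.foldl_cons]
    by_cases hx : x ∈ acc
    · have : PySem.Set.add acc x = acc := by simp [PySem.Set.add, PySem.Set.contains, hx]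
      rw [this]
      exact ih (pre ++ [x]) acc (by simp [hfull]) (by
        intro a; rw [hmem]; constructor
        · intro h; simp [h]
        · intro h; rcases List.mem_append.1 h with h | h
          · exact h
          · simp only [List.mem_singleton] at h; rw [h]; exact (hmem x).1 hx) hp
    · have : PySem.Set.add acc x = acc ++ [x] := by simp [PySem.Set.add, PySem.Set.contains, hx]
      rw [this]
      have hxpre : x ∉ pre := fun h => hx ((hmem x).2 h)
      exact ih (pre ++ [x]) (acc ++ [x]) (by simp [hfull]) (by
        intro a; simp [hmem]) (by
        rw [List.pairwise_append]
        refine ⟨hp, by simp, ?_⟩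
        intro a ha b hb
        simp only [List.mem_singleton] at hb
        rw [hb]
        have hapre : a ∈ pre := (hmem a).1 ha
        have h1 : bkey full a < pre.length := by
          rw [hfull]; exact bkey_lt_of_mem_append pre (x :: rest) a hapre
        have h2 : bkey full x = pre.length := by
          rw [hfull]; exact bkey_head_append pre rest x hxpre
        omega)

lemma sorted_ofList_eq_dedup (value : List String) :
    PySem.List.sorted (PySem.Set.ofList value) (bkey value) false = PySem.List.dedup value := by
  apply PySem.List.sorted_eq_of_perm_of_pairwise_lt
  · simp [PySem.List.dedup_eq_ofList]
  · rw [PySem.List.dedup_eq_ofList, PySem.Set.ofList_eq_foldl]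
    exact ofList_pairwise_bkey value value [] [] rfl (by simp) (by simp)

-- ===== VERDICT (by name: the statement is the Claim_ definition above) =====
theorem normalize_enabled_locales_py_spec : Claim_equal_normalize_enabled_locales_py := by
  intro value _
  unfold Spec_normalize_enabled_locales_py normalize_enabled_locales_py normalize_enabled_locales_py_alt
  by_cases hnil : value = []
  · simp [hnil]
  · simp only [hnil, if_false]
    rw [aLoop_char value [] PySem.Set.empty (by intro x; simp [PySem.Set.empty, PySem.Set.contains])]
    by_cases hall : value.all (fun x => decide (x ∈ ALLOWED_LOCALES))
    · have hany : value.any (fun x => decide (¬ (x ∈ ALLOWED_LOCALES))) = false := by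
        simp only [List.any_eq_false]; intro x hx
        simp only [List.all_eq_true] at hall
        simpa using hall x hx
      have hne : value.foldl dstep [] ≠ [] := by
        cases value with
        | nil => exact absurd rfl hnil
        | cons v vs =>
          simp only [List.foldl_cons]
          exact foldl_dstep_ne_nil vs (dstep [] v) (by simp [dstep])
      rw [if_pos hall, if_neg hne, hany]
      simp only [Bool.false_eq_true, if_false]
      rw [← dedup_eq_foldl]
      have := sorted_ofList_eq_dedup value
      rw [show (fun x => (PySem.List.index? value x).getD 0) = bkey value from rfl, this]
    · have hany : value.any (fun x => decide (¬ (x ∈ ALLOWED_LOCALES))) = true := by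
        rw [Bool.not_eq_true] at hall
        simp only [List.all_eq_false] at hall
        obtain ⟨x, hx, hxv⟩ := hall
        simp only [List.any_eq_true]
        exact ⟨x, hx, by simpa using hxv⟩
      rw [if_neg hall, if_pos hany]
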